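-- pv_equiv track=rewrite | github.com/vgsvvley/discord | dmalgocode1.py | suivants
-- ===== SOURCE A (Python) =====
-- def suivants(s):
--     """Retourne le dictionnaire des successeurs de chaque caractère."""
--     d = {}
--     for c in s:
--         if c not in d:
--             d[c] = set()
--     for i in range(len(s) - 1):
--         caractere_actuel = s[i]
--         caractere_suivant = s[i+1]
--         d[caractere_actuel].add(caractere_suivant)
--     return d
-- ===== SOURCE B (Python) =====
-- def suivants(s):
--     """Retourne le dictionnaire des successeurs de chaque caractère."""
--     pairs = list(zip(s, s[1:]))
--     return {c: {b for a, b in pairs if a == c} for c in dict.fromkeys(s)}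
-- ===== Notes on version B (the rewrite author's own statement) =====
-- stated objective: alternative
-- what changed: Replaces A's incremental mutation (seed keys, then add each successor into its set one adjacent pair at a time) with a declarative comprehension: materialize the adjacent-pair list once via zip(s, s[1:]) and build the result as a dict comprehension over dict.fromkeys(s), computing each key's whole successor set by filtering the pair list.
import Mathlib
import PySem

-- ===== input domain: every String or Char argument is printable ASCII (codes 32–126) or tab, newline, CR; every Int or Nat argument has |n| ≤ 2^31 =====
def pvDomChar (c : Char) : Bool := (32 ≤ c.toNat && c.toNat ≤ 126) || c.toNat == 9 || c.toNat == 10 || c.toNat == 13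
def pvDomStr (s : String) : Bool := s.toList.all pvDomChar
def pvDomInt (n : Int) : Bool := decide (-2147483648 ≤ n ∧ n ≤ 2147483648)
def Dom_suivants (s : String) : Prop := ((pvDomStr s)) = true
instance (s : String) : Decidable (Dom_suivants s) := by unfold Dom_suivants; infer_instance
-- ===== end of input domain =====

-- B replaces A's incremental set mutation over adjacent pairs with a declarative
-- comprehension: the pair list zip(s, s[1:]) is built once and each key's whole
-- successor set is obtained by filtering it; same return value.

-- ===== PORT A =====
def suivants (s : String) : List (String × List String) :=
  let d : PySem.Dict String (PySem.Set String) :=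
    s.toList.foldl (fun d c =>
      if d.contains (String.singleton c) then d
      else d.insert (String.singleton c) PySem.Set.empty) PySem.Dict.empty
  let d2 :=
    (PySem.List.pyRange 0 (PySem.Str.len s - 1) 1).foldl (fun d i =>
      let caractere_actuel := ((PySem.Str.pyGet? s i).map String.singleton).getD ""
      let caractere_suivant := ((PySem.Str.pyGet? s (i + 1)).map String.singleton).getD ""
      d.modify caractere_actuel PySem.Set.empty
        (fun t => PySem.Set.add t caractere_suivant)) d
  d2.items

-- ===== PORT B =====
def suivants_alt (s : String) : List (String × List String) :=
  let pairs := s.toList.zip (PySem.Str.slice s (some 1) none).toList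
  ((PySem.List.dedup s.toList).foldl (fun d c =>
      d.insert (String.singleton c)
        (PySem.Set.ofList ((pairs.filter (fun p => p.1 == c)).map
          (fun p => String.singleton p.2))))
    PySem.Dict.empty).items

-- ===== PRECONDITION & SPEC =====
def Spec_suivants (s : String) (out : List (String × List String)) : Prop := out = suivants_alt s
instance (s : String) (out : List (String × List String)) : Decidable (Spec_suivants s out) := by unfold Spec_suivants; infer_instance

-- ===== CLAIM (what is proved, stated in full; the proofs are below) =====
def Claim_equal_suivants : Prop := ∀ (s : String), Dom_suivants s → Spec_suivants s (suivants s)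

-- ===== LEMMAS AND PROOFS =====

-- proof-side abbreviations for A's two loop bodies
def pvSeed (d : PySem.Dict String (PySem.Set String)) (c : Char) :
    PySem.Dict String (PySem.Set String) :=
  if d.contains (String.singleton c) then d
  else d.insert (String.singleton c) PySem.Set.empty

def pvAdd (d : PySem.Dict String (PySem.Set String)) (p c : String) :
    PySem.Dict String (PySem.Set String) :=
  d.modify p PySem.Set.empty (fun t => PySem.Set.add t c)

-- the pair loop of A, expressed structurally over the character list
def pvPairs (d : PySem.Dict String (PySem.Set String)) :
    List Char → PySem.Dict String (PySem.Set String)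
  | a :: b :: t => pvPairs (pvAdd d (String.singleton a) (String.singleton b)) (b :: t)
  | _ => d

theorem pv_singleton_inj (a b : Char) (h : String.singleton a = String.singleton b) : a = b := by
  have := congrArg String.toList h
  simpa [String.singleton] using this

theorem pv_singleton_beq (a b : Char) :
    (String.singleton a == String.singleton b) = (a == b) := by
  by_cases h : a = b
  · simp [h]
  · have : String.singleton a ≠ String.singleton b := fun hc => h (pv_singleton_inj a b hc)
    simp [h, this]

-- A's index loop over range(len(s)-1) equals the structural pair fold
theorem pv_range_aux (t : List Char) :
    ∀ (a : Char) (d : PySem.Dict String (PySem.Set String)),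
    (List.range t.length).foldl
      (fun d k => pvAdd d ((((a :: t)[k]?).map String.singleton).getD "")
                          ((((a :: t)[k+1]?).map String.singleton).getD "")) d
    = pvPairs d (a :: t) := by
  induction t with
  | nil => intro a d; rfl
  | cons b t ih =>
    intro a d
    simp only [List.length_cons]
    rw [List.range_succ_eq_map]
    simp only [List.foldl_cons, List.foldl_map]
    have hbody :
        (fun d k => pvAdd d ((((a :: b :: t)[k+1]?).map String.singleton).getD "")
                            ((((a :: b :: t)[k+1+1]?).map String.singleton).getD ""))
        = (fun d k => pvAdd d ((((b :: t)[k]?).map String.singleton).getD "")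
                              ((((b :: t)[k+1]?).map String.singleton).getD "")) := by
      funext d k
      simp
    simp only [Nat.succ_eq_add_one]
    rw [hbody]
    have h0 : (((a :: b :: t)[0]?).map String.singleton).getD "" = String.singleton a := by simp
    have h1 : (((a :: b :: t)[0+1]?).map String.singleton).getD "" = String.singleton b := by simp
    rw [h0, h1, ih b]
    rfl

theorem pv_A_eq_pairs (cs : List Char) (d : PySem.Dict String (PySem.Set String)) :
    (PySem.List.pyRange 0 ((cs.length : Int) - 1) 1).foldl (fun d i =>
      pvAdd d (((PySem.List.pyGet? cs i).map String.singleton).getD "")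
              (((PySem.List.pyGet? cs (i + 1)).map String.singleton).getD "")) d
    = pvPairs d cs := by
  cases cs with
  | nil =>
    rw [PySem.List.pyRange_one_eq_nil (by simp)]
    rfl
  | cons a t =>
    have hlen : ((a :: t).length : Int) - 1 = (t.length : Int) := by simp
    rw [hlen, PySem.List.pyRange_one 0 (t.length : Int)]
    simp only [sub_zero, Int.toNat_natCast, List.foldl_map]
    have hbody : (fun d (k : Nat) =>
        pvAdd d (((PySem.List.pyGet? (a :: t) ((0 : Int) + k)).map String.singleton).getD "")
                (((PySem.List.pyGet? (a :: t) ((0 : Int) + k + 1)).map String.singleton).getD ""))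
        = (fun d (k : Nat) => pvAdd d ((((a :: t)[k]?).map String.singleton).getD "")
                                      ((((a :: t)[k+1]?).map String.singleton).getD "")) := by
      funext d k
      have e1 : (0 : Int) + (k : Int) = ((k : Nat) : Int) := by omega
      have e2 : ((k : Nat) : Int) + 1 = (((k + 1 : Nat)) : Int) := by push_cast; ring
      rw [e1, e2, PySem.List.pyGet?_natCast, PySem.List.pyGet?_natCast]
    rw [hbody]
    exact pv_range_aux t a d

-- the structural pair fold IS the fold over zip(s, s[1:])
theorem pv_pairs_eq_zip (cs : List Char) :
    ∀ d, pvPairs d cs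
      = (cs.zip cs.tail).foldl (fun d p => pvAdd d (String.singleton p.1) (String.singleton p.2)) d := by
  induction cs with
  | nil => intro d; rfl
  | cons a t ih =>
    intro d
    cases t with
    | nil => rfl
    | cons b t' =>
      show pvPairs (pvAdd d (String.singleton a) (String.singleton b)) (b :: t') = _
      rw [ih]
      rfl

-- getD of the pair fold: only the pairs whose first char names the key contribute
theorem pv_getD_zipfold (l : List (Char × Char)) :
    ∀ (d : PySem.Dict String (PySem.Set String)) (q : String),
    ((l.foldl (fun d p => pvAdd d (String.singleton p.1) (String.singleton p.2)) d).getD q PySem.Set.empty)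
    = ((l.filter (fun p => String.singleton p.1 == q)).map (fun p => String.singleton p.2)).foldl
        PySem.Set.add (d.getD q PySem.Set.empty) := by
  induction l with
  | nil => intro d q; rfl
  | cons p l ih =>
    intro d q
    simp only [List.foldl_cons]
    rw [ih]
    unfold pvAdd
    rw [PySem.Dict.getD_modify]
    by_cases h : q = String.singleton p.1
    · subst h
      simp
    · have hb : (String.singleton p.1 == q) = false := by
        simp only [beq_eq_false_iff_ne, ne_eq]
        exact fun hc => h hc.symm
      simp [h, hb]

-- every value of the seeded dict is the empty set
theorem pv_getD_seed (cs : List Char) :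
    ∀ (d : PySem.Dict String (PySem.Set String)),
    (∀ q, d.getD q PySem.Set.empty = PySem.Set.empty) →
    ∀ q, (cs.foldl pvSeed d).getD q PySem.Set.empty = PySem.Set.empty := by
  induction cs with
  | nil => intro d h q; exact h q
  | cons c cs ih =>
    intro d h q
    refine ih (pvSeed d c) ?_ q
    intro q'
    unfold pvSeed
    split
    · exact h q'
    · rw [PySem.Dict.getD_insert]
      split
      · rfl
      · exact h q'

-- keys of the seeded dict: first occurrences in order, as singleton strings
theorem pv_keys_seed_step (d : PySem.Dict String (PySem.Set String)) (c : Char) :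
    (pvSeed d c).keys = PySem.Set.add d.keys (String.singleton c) := by
  unfold pvSeed PySem.Set.add
  by_cases h : d.contains (String.singleton c) = true
  · have : PySem.Set.contains d.keys (String.singleton c) = true := by
      have := (PySem.Dict.contains_iff_mem_keys (d := d) (k := String.singleton c)).1 h
      simpa [PySem.Set.contains] using this
    rw [if_pos h, if_pos this]
  · have hf : d.contains (String.singleton c) = false := by
      cases hh : d.contains (String.singleton c)
      · rfl
      · exact absurd hh h
    have : PySem.Set.contains d.keys (String.singleton c) = false := by
      by_contra hc
      have : PySem.Set.contains d.keys (String.singleton c) = true := by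
        cases hh : PySem.Set.contains d.keys (String.singleton c)
        · exact absurd hh hc
        · rfl
      have : String.singleton c ∈ d.keys := by simpa [PySem.Set.contains] using this
      have := (PySem.Dict.contains_iff_mem_keys (d := d) (k := String.singleton c)).2 this
      simp [hf] at this
    rw [if_neg h, this]
    simp only [Bool.false_eq_true, if_false]
    exact PySem.Dict.keys_insert_of_not_contains d _ hf

theorem pv_keys_seed (cs : List Char) :
    ∀ (d : PySem.Dict String (PySem.Set String)),
    (cs.foldl pvSeed d).keys = PySem.Set.update d.keys (cs.map String.singleton) := by
  induction cs with
  | nil => intro d; rfl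
  | cons c cs ih =>
    intro d
    simp only [List.foldl_cons, List.map_cons]
    rw [ih (pvSeed d c), pv_keys_seed_step]
    rfl

-- Set.ofList commutes with mapping the injective String.singleton
theorem pv_ofList_map_singleton (cs : List Char) :
    PySem.Set.ofList (cs.map String.singleton)
      = (PySem.Set.ofList cs).map String.singleton := by
  have gen : ∀ (l : List Char) (s : PySem.Set Char),
      (l.map String.singleton).foldl PySem.Set.add (s.map String.singleton)
        = (l.foldl PySem.Set.add s).map String.singleton := by
    intro l
    induction l with
    | nil => intro s; rfl
    | cons x l ih =>
      intro s
      simp only [List.map_cons, List.foldl_cons]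
      have hc : PySem.Set.contains (s.map String.singleton) (String.singleton x)
          = PySem.Set.contains s x := by
        by_cases hx : x ∈ s
        · have hm : String.singleton x ∈ s.map String.singleton := List.mem_map_of_mem hx
          simp [PySem.Set.contains, hx, hm]
        · have hm : String.singleton x ∉ s.map String.singleton := by
            intro hm
            obtain ⟨y, hy, he⟩ := List.mem_map.1 hm
            exact hx ((pv_singleton_inj y x he) ▸ hy)
          simp [PySem.Set.contains, hx, hm]
      have hstep : PySem.Set.add (s.map String.singleton) (String.singleton x)
          = (PySem.Set.add s x).map String.singleton := by
        unfold PySem.Set.add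
        rw [hc]
        split
        · rfl
        · simp
      rw [hstep, ih]
  have := gen cs []
  simpa [PySem.Set.ofList_eq_foldl] using this

-- Set.update adds nothing when every element is already present
theorem pv_update_of_mem (l : List String) :
    ∀ (s : PySem.Set String), (∀ x ∈ l, x ∈ s) → PySem.Set.update s l = s := by
  induction l with
  | nil => intro s _; rfl
  | cons x l ih =>
    intro s h
    show List.foldl PySem.Set.add (PySem.Set.add s x) l = s
    have hx : PySem.Set.add s x = s := by
      unfold PySem.Set.add
      have : PySem.Set.contains s x = true := by
        simpa [PySem.Set.contains] using h x (List.mem_cons_self)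
      rw [if_pos this]
    rw [hx]
    exact ih s (fun y hy => h y (List.mem_cons_of_mem _ hy))

-- ===== VERDICT proof =====
theorem suivants_spec : Claim_equal_suivants := by
  intro s _
  unfold Spec_suivants suivants suivants_alt
  simp only
  set cs := s.toList with hcs
  -- B's pair list is zip cs cs.tail
  have hsl : (PySem.Str.slice s (some 1) none).toList = cs.tail := by
    rw [PySem.Str.toList_slice, PySem.Chars.slice_eq_listSlice, PySem.List.slice_from_one]
  rw [hsl]
  -- A's second loop: pyRange fold = zip fold
  have hstr : ∀ i : Int, PySem.Str.pyGet? s i = PySem.List.pyGet? cs i := by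
    intro i; simp [PySem.Str.pyGet?, hcs]
  have hlen : PySem.Str.len s = (cs.length : Int) := PySem.Str.len_eq s
  rw [hlen]
  set d1 := cs.foldl pvSeed PySem.Dict.empty with hd1
  have hA : (PySem.List.pyRange 0 ((cs.length : Int) - 1) 1).foldl (fun d i =>
      PySem.Dict.modify d ((Option.map String.singleton (PySem.Str.pyGet? s i)).getD "")
        PySem.Set.empty
        (fun t => PySem.Set.add t ((Option.map String.singleton (PySem.Str.pyGet? s (i + 1))).getD "")))
        d1
      = (cs.zip cs.tail).foldl (fun d p => pvAdd d (String.singleton p.1) (String.singleton p.2)) d1 := by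
    rw [← pv_pairs_eq_zip]
    simp only [hstr]
    exact pv_A_eq_pairs cs d1
  show ((PySem.List.pyRange 0 ((cs.length : Int) - 1) 1).foldl _ d1).items = _
  rw [hA]
  set d2 := (cs.zip cs.tail).foldl (fun d p => pvAdd d (String.singleton p.1) (String.singleton p.2)) d1 with hd2
  -- keys of d1 and d2
  have hkeys1 : d1.keys = (PySem.List.dedup cs).map String.singleton := by
    rw [hd1, pv_keys_seed cs PySem.Dict.empty]
    show PySem.Set.update PySem.Set.empty (cs.map String.singleton) = _
    rw [show PySem.Set.update PySem.Set.empty (cs.map String.singleton)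
          = PySem.Set.ofList (cs.map String.singleton) from rfl,
        pv_ofList_map_singleton, PySem.List.dedup_eq_ofList]
  have hkeys2 : d2.keys = d1.keys := by
    rw [hd2]
    simp only [pvAdd]
    rw [PySem.Dict.keys_foldl_modify_key (key := fun p : Char × Char => String.singleton p.1)
        (f := fun _ p => (fun t => PySem.Set.add t (String.singleton p.2)))]
    apply pv_update_of_mem
    intro x hx
    obtain ⟨p, hp, he⟩ := List.mem_map.1 hx
    have hp1 : p.1 ∈ cs := (List.of_mem_zip hp).1
    rw [hkeys1, ← he]
    exact List.mem_map_of_mem ((PySem.List.mem_dedup cs p.1).2 hp1)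
  have hnd1 : d1.keys.Nodup := by
    rw [hkeys1]
    exact (PySem.List.nodup_dedup cs).map (fun a b h => pv_singleton_inj a b h)
  have hnd2 : d2.keys.Nodup := hkeys2 ▸ hnd1
  -- values of d2
  have hval : ∀ c ∈ PySem.List.dedup cs,
      d2.getD (String.singleton c) PySem.Set.empty
        = PySem.Set.ofList (((cs.zip cs.tail).filter (fun p => p.1 == c)).map
            (fun p => String.singleton p.2)) := by
    intro c _
    rw [hd2, pv_getD_zipfold]
    have hbase : d1.getD (String.singleton c) PySem.Set.empty = PySem.Set.empty := by
      rw [hd1]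
      exact pv_getD_seed cs PySem.Dict.empty (fun q => PySem.Dict.getD_empty _ _) _
    rw [hbase]
    have hfil : ((cs.zip cs.tail).filter (fun p => String.singleton p.1 == String.singleton c))
        = ((cs.zip cs.tail).filter (fun p => p.1 == c)) := by
      apply List.filter_congr
      intro p _
      exact pv_singleton_beq p.1 c
    rw [hfil, PySem.Set.ofList_eq_foldl]
    rfl
  -- items of both sides as the same map over dedup cs
  rw [PySem.Dict.items_eq_map_keys d2 hnd2 PySem.Set.empty, hkeys2, hkeys1, List.map_map]
  rw [PySem.Dict.items_foldl_insert_fresh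
      (l := PySem.List.dedup cs) (k := String.singleton)
      (v := fun c => PySem.Set.ofList (((cs.zip cs.tail).filter (fun p => p.1 == c)).map
          (fun p => String.singleton p.2)))
      (d := PySem.Dict.empty)
      (fun a _ => PySem.Dict.contains_empty _)
      (hkeys1 ▸ hnd1 : ((PySem.List.dedup cs).map String.singleton).Nodup)]
  rw [show (PySem.Dict.empty : PySem.Dict String (PySem.Set String)).items = [] from rfl, List.nil_append]
  apply List.map_congr_left
  intro c hc
  simp only [Function.comp]
  rw [hval c hc]
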